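-- pv_equiv track=rewrite | github.com/BioGeMT/varMT | src/utils/vep_utils.py | extract_annotations_from_csq
-- ===== SOURCE A (Python) =====
-- def extract_annotations_from_csq(csq_annotations: tuple, csq_index: dict) -> list:
--     """
--     Extract variant annotations from VEP CSQ field.
--
--     Args:
--         csq_annotations (tuple): The CSQ annotations from record.info['CSQ']
--         csq_index (dict): Mapping of CSQ field names to indices
--
--     Returns:
--         list: List of annotation dictionaries with keys: transcript_id, hgvs_c, hgvs_p, consequence, impact
--     """
--     if not csq_annotations:
--         return []
--
--     # Get field indices
--     transcript_idx = csq_index.get('Feature')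
--     hgvsc_idx = csq_index.get('HGVSc')
--     hgvsp_idx = csq_index.get('HGVSp')
--     consequence_idx = csq_index.get('Consequence')
--     impact_idx = csq_index.get('IMPACT')
--
--     annotations = []
--
--     for annotation in csq_annotations:
--         fields = annotation.split('|')
--
--         # Extract fields (use None if field is empty or doesn't exist)
--         transcript_id = fields[transcript_idx] if transcript_idx is not None and len(fields) > transcript_idx and fields[transcript_idx] else None
--         hgvs_c = fields[hgvsc_idx] if hgvsc_idx is not None and len(fields) > hgvsc_idx and fields[hgvsc_idx] else None
--         hgvs_p = fields[hgvsp_idx] if hgvsp_idx is not None and len(fields) > hgvsp_idx and fields[hgvsp_idx] else None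
--         consequence = fields[consequence_idx] if consequence_idx is not None and len(fields) > consequence_idx and fields[consequence_idx] else None
--         impact = fields[impact_idx] if impact_idx is not None and len(fields) > impact_idx and fields[impact_idx] else None
--
--         annotations.append({
--             'transcript_id': transcript_id,
--             'hgvs_c': hgvs_c,
--             'hgvs_p': hgvs_p,
--             'consequence': consequence,
--             'impact': impact
--         })
--
--     return annotations
-- ===== SOURCE B (Python) =====
-- _FIELDS = (('transcript_id', 'Feature'), ('hgvs_c', 'HGVSc'),
--            ('hgvs_p', 'HGVSp'), ('consequence', 'Consequence'),
--            ('impact', 'IMPACT'))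
--
--
-- def extract_annotations_from_csq(csq_annotations: tuple, csq_index: dict) -> list:
--     # Column-major: split everything first, build one value column per output
--     # key, then transpose the columns into per-annotation dicts.
--     if not csq_annotations:
--         return []
--     tables = [a.split('|') for a in csq_annotations]
--     cols = []
--     for key, name in _FIELDS:
--         i = csq_index.get(name)
--         if i is None:
--             cols.append((key, [None] * len(tables)))
--         else:
--             cols.append((key, [(f[i] or None) if i < len(f) else None
--                                for f in tables]))
--     return [dict((key, col[j]) for key, col in cols)
--             for j in range(len(tables))]
-- ===== Notes on version B (the rewrite author's own statement) =====
-- stated objective: alternative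
-- what changed: B works column-major: it splits all annotations first, builds one value column per output key (looking each CSQ field name up once), and then transposes the five columns into per-annotation dicts, instead of A's row-major pass extracting five fields per annotation.
import Mathlib
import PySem

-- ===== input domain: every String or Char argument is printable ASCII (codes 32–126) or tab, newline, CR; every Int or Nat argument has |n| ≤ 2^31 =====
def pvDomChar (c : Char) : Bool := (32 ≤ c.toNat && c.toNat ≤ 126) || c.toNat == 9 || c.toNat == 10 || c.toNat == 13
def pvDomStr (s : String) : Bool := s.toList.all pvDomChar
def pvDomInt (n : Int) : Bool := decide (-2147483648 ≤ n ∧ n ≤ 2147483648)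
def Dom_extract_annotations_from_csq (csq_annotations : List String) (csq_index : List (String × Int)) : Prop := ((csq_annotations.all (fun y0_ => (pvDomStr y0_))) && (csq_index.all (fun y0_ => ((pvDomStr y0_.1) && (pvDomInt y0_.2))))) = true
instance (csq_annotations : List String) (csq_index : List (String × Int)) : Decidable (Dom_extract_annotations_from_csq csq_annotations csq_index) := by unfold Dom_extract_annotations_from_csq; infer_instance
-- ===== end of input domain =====

-- B builds the result column-major (one value column per output key, then a transpose
-- into per-annotation dicts) instead of A's row-major single pass; same return value.

-- ===== PORT A =====
def extract_annotations_from_csq (csq_annotations : List String) (csq_index : List (String × Int)) : List (List (String × Option String)) :=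
  if csq_annotations = [] then []
  else
    let transcript_idx := csq_index.lookup "Feature"
    let hgvsc_idx := csq_index.lookup "HGVSc"
    let hgvsp_idx := csq_index.lookup "HGVSp"
    let consequence_idx := csq_index.lookup "Consequence"
    let impact_idx := csq_index.lookup "IMPACT"
    csq_annotations.foldl (fun annotations annotation =>
      let fields := ((PySem.Str.split? annotation "|").getD [])
      let transcript_id := match transcript_idx with
        | some i => if i < (fields.length : Int) then
            (match PySem.List.pyGet? fields i with
             | some v => if v = "" then none else some v
             | none => none)  -- Python raises IndexError here; excluded by Pre_
          else none
        | none => none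
      let hgvs_c := match hgvsc_idx with
        | some i => if i < (fields.length : Int) then
            (match PySem.List.pyGet? fields i with
             | some v => if v = "" then none else some v
             | none => none)
          else none
        | none => none
      let hgvs_p := match hgvsp_idx with
        | some i => if i < (fields.length : Int) then
            (match PySem.List.pyGet? fields i with
             | some v => if v = "" then none else some v
             | none => none)
          else none
        | none => none
      let consequence := match consequence_idx with
        | some i => if i < (fields.length : Int) then
            (match PySem.List.pyGet? fields i with
             | some v => if v = "" then none else some v
             | none => none)
          else none
        | none => none
      let impact := match impact_idx with
        | some i => if i < (fields.length : Int) then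
            (match PySem.List.pyGet? fields i with
             | some v => if v = "" then none else some v
             | none => none)
          else none
        | none => none
      annotations ++ [[("transcript_id", transcript_id), ("hgvs_c", hgvs_c),
                       ("hgvs_p", hgvs_p), ("consequence", consequence), ("impact", impact)]]) []

-- ===== PORT B =====
-- Source B's per-cell expression: (f[i] or None) if i < len(f) else None
def pvColVal (fields : List String) (i : Int) : Option String :=
  if i < (fields.length : Int) then
    match PySem.List.pyGet? fields i with
    | some v => if v = "" then none else some v
    | none => none  -- Python raises IndexError here; excluded by Pre_
  else none

def extract_annotations_from_csq_alt (csq_annotations : List String) (csq_index : List (String × Int)) : List (List (String × Option String)) :=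
  if csq_annotations = [] then []
  else
    let tables := csq_annotations.map (fun a => (PySem.Str.split? a "|").getD [])
    let cols := ([("transcript_id", "Feature"), ("hgvs_c", "HGVSc"), ("hgvs_p", "HGVSp"),
                  ("consequence", "Consequence"), ("impact", "IMPACT")] : List (String × String)).map
      (fun p => match csq_index.lookup p.2 with
        | none => (p.1, tables.map (fun _ => (none : Option String)))
        | some i => (p.1, tables.map (fun f => pvColVal f i)))
    (List.range tables.length).map (fun j =>
      cols.map (fun c => (c.1, c.2.getD j none)))  -- col[j], j always in range here

-- ===== PRECONDITION & SPEC =====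
-- Pre_ excludes exactly the inputs where Python A raises IndexError: a looked-up index
-- more negative than the length of an annotation's field list (both A and B raise there).
def Pre_extract_annotations_from_csq (csq_annotations : List String) (csq_index : List (String × Int)) : Prop :=
  ∀ ann ∈ csq_annotations, ∀ name ∈ (["Feature", "HGVSc", "HGVSp", "Consequence", "IMPACT"] : List String),
    ((csq_index.lookup name).all (fun i => -((((PySem.Str.split? ann "|").getD [])).length : Int) ≤ i)) = true
instance (csq_annotations : List String) (csq_index : List (String × Int)) : Decidable (Pre_extract_annotations_from_csq csq_annotations csq_index) := by unfold Pre_extract_annotations_from_csq; infer_instance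

def pvWitness_extract_annotations_from_csq : List String × (List (String × Int)) :=
  (["ENST1|c.1A>G||missense|HIGH", "x|||"], [("Feature", 0), ("HGVSc", 1), ("Consequence", 3), ("IMPACT", 4)])

def Spec_extract_annotations_from_csq (csq_annotations : List String) (csq_index : List (String × Int)) (out : List (List (String × Option String))) : Prop := out = extract_annotations_from_csq_alt csq_annotations csq_index
instance (csq_annotations : List String) (csq_index : List (String × Int)) (out : List (List (String × Option String))) : Decidable (Spec_extract_annotations_from_csq csq_annotations csq_index out) := by unfold Spec_extract_annotations_from_csq; infer_instance

-- ===== CLAIM (what is proved, stated in full; the proofs are below) =====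
def Claim_equal_extract_annotations_from_csq : Prop := ∀ (csq_annotations : List String) (csq_index : List (String × Int)), Dom_extract_annotations_from_csq csq_annotations csq_index → Pre_extract_annotations_from_csq csq_annotations csq_index → Spec_extract_annotations_from_csq csq_annotations csq_index (extract_annotations_from_csq csq_annotations csq_index)

-- ===== LEMMAS AND PROOFS =====

-- push Source B's column-level branch on the looked-up index inside the pair and the map
theorem pvCol_push (k : String) (ts : List (List String)) (o : Option Int) :
    (match o with
      | none => (k, ts.map (fun _ => (none : Option String)))
      | some i => (k, ts.map (fun f => pvColVal f i))) =
    (k, ts.map (fun f => o.elim none (pvColVal f))) := by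
  cases o <;> rfl

-- A's per-cell conditional expression, as a function of the looked-up index
theorem pvCell (f : List String) (o : Option Int) :
    (match o with
      | some i => if i < (f.length : Int) then
          (match PySem.List.pyGet? f i with
           | some v => if v = "" then none else some v
           | none => none)
        else none
      | none => (none : Option String)) = o.elim none (pvColVal f) := by
  cases o <;> rfl

-- ===== VERDICT (by name: the statement is the Claim_ definition above) =====
theorem extract_annotations_from_csq_spec : Claim_equal_extract_annotations_from_csq := by
  intro cs ci _ _
  unfold Spec_extract_annotations_from_csq extract_annotations_from_csq extract_annotations_from_csq_alt
  split
  · rfl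
  · rw [PySem.List.foldl_append_singleton_eq_map]
    simp only [List.nil_append]
    apply List.ext_getElem
    · simp
    · intro j h1 h2
      simp only [List.getElem_map, List.getElem_range, List.map_cons, List.map_nil]
      have hj : j < cs.length := by simpa using h2
      simp only [List.getD_eq_getElem?_getD]
      simp only [pvCol_push, pvCell, List.getElem?_map, List.getElem?_eq_getElem hj,
        Option.map_some, Option.getD_some]
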